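-- pv_equiv track=rewrite | github.com/nicolascoco85/EjerciciosCFP34 | calcularFull.py | esFull
-- ===== SOURCE A (Python) =====
-- def dado_esta_repito(numero,tirada):
--
--     return  (numero, tirada.count(numero))
--
-- def esFull(tirada):
--     repeticiones=[]
--     hay_tres_repetido=False
--     hay_dos_repetido=False
--
--     #GUARDO EN UNA LISTA EL NUMERO QUE SALIO CON SUS REPETICIONES ASOCIADAS
--     for i in range (0,len(tirada)):
--         repeticiones.append(dado_esta_repito(tirada[i],tirada))
--
--     #ANALIZO SI EXISTEN 3 REPETIDOS Y OTROS 2 REPETIDOS DENTRO DE LA LA MISMA TIRADA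
--
--     for j in range(0,len(repeticiones)):
--         if (repeticiones[j][1]==3):
--             hay_tres_repetido=True
--         else:
--             if(repeticiones[j][1]==2):
--                 hay_dos_repetido=True
--
--     #EN CASO DE QUE HAYA 3 REPETIDOS Y OTROS DOS REPETIDOS TENEMOS FULL, CASO CONTRARIO NO EXISTE FULL
--     return hay_tres_repetido and hay_dos_repetido
-- ===== SOURCE B (Python) =====
-- def esFull(tirada):
--     # Sort a copy, then one linear scan over maximal runs of equal values.
--     s = sorted(tirada)
--     has3 = False
--     has2 = False
--     run = 0
--     prev = None
--     for v in s:
--         if prev is not None and v == prev: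
--             run += 1
--         else:
--             if run == 3:
--                 has3 = True
--             elif run == 2:
--                 has2 = True
--             run = 1
--             prev = v
--     if run == 3:
--         has3 = True
--     elif run == 2:
--         has2 = True
--     return has3 and has2
-- ===== Notes on version B (the rewrite author's own statement) =====
-- stated objective: faster
-- what changed: A calls tirada.count for every position (quadratic nested scans over a tally list); B sorts a copy once and makes a single linear pass over maximal runs of equal values, setting the 3-flag/2-flag from exact run lengths.
import Mathlib
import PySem

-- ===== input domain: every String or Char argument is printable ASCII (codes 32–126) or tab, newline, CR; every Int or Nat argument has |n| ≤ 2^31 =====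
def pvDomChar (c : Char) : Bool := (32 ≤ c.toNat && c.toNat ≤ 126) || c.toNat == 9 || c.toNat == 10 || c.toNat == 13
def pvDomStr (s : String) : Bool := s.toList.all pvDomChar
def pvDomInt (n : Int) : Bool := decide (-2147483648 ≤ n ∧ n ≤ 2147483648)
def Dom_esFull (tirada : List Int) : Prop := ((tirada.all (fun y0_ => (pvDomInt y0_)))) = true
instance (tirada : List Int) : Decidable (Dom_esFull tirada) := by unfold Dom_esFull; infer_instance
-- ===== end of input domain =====

-- B replaces A's quadratic per-position count tally by sort + one linear run scan (measured faster at the large sizes).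


-- ===== PORT A =====
def dado_esta_repito (numero : Int) (tirada : List Int) : Int × Int :=
  (numero, (PySem.List.count tirada numero : Int))

def esFull (tirada : List Int) : Bool :=
  let repeticiones : List (Int × Int) :=
    (PySem.List.pyRange 0 tirada.length 1).foldl
      (fun acc i => acc ++ [dado_esta_repito (PySem.List.pyGetD tirada i 0) tirada]) []
  let st :=
    (PySem.List.pyRange 0 repeticiones.length 1).foldl
      (fun st j =>
        let p := PySem.List.pyGetD repeticiones j (0, 0)
        if p.2 = 3 then (true, st.2)
        else if p.2 = 2 then (st.1, true) else st)
      (false, false)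
  st.1 && st.2

-- ===== PORT B =====
-- flush the run that just ended into the two flags (the if/elif at a run boundary)
def flushRun (run : Nat) (h3 h2 : Bool) : Bool × Bool :=
  if run = 3 then (true, h2) else if run = 2 then (h3, true) else (h3, h2)

-- the for-loop of B plus the final flush, as structural recursion over the sorted list
def scanRuns : List Int → Option Int → Nat → Bool → Bool → Bool × Bool
  | [], _, run, h3, h2 => flushRun run h3 h2
  | v :: rest, prev, run, h3, h2 =>
    if prev = some v then scanRuns rest prev (run + 1) h3 h2
    else
      let st := flushRun run h3 h2
      scanRuns rest (some v) 1 st.1 st.2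

def esFull_alt (tirada : List Int) : Bool :=
  let s := PySem.List.sorted tirada (fun x => x) false
  let st := scanRuns s none 0 false false
  st.1 && st.2

-- ===== PRECONDITION & SPEC =====
def Spec_esFull (tirada : List Int) (out : Bool) : Prop := out = esFull_alt tirada
instance (tirada : List Int) (out : Bool) : Decidable (Spec_esFull tirada out) := by unfold Spec_esFull; infer_instance

-- ===== CLAIM (what is proved, stated in full; the proofs are below) =====
def Claim_equal_esFull : Prop := ∀ (tirada : List Int), Dom_esFull tirada → Spec_esFull tirada (esFull tirada)

-- ===== LEMMAS AND PROOFS =====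

theorem flushRun_eq (run : Nat) (h3 h2 : Bool) :
    flushRun run h3 h2 = (h3 || decide (run = 3), h2 || decide (run = 2)) := by
  unfold flushRun; split_ifs <;> simp_all

-- A's second loop computes the two "any count = k" flags
theorem flagsFold (l : List (Int × Int)) (h3 h2 : Bool) :
    l.foldl (fun st p =>
        if p.2 = 3 then (true, st.2)
        else if p.2 = 2 then (st.1, true) else st) (h3, h2)
      = (h3 || l.any (fun p => decide (p.2 = 3)), h2 || l.any (fun p => decide (p.2 = 2))) := by
  induction l generalizing h3 h2 with
  | nil => simp
  | cons p r ih =>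
    simp only [List.foldl_cons, List.any_cons]
    by_cases hp3 : p.2 = 3
    · simp [hp3, ih]
    · by_cases hp2 : p.2 = 2 <;> simp [hp3, hp2, ih]

theorem secondFold (l : List (Int × Int)) :
    (PySem.List.pyRange 0 (l.length : Int) 1).foldl
        (fun st j =>
          let p := PySem.List.pyGetD l j (0, 0)
          if p.2 = 3 then (true, st.2)
          else if p.2 = 2 then (st.1, true) else st)
        (false, false)
      = (l.any (fun p => decide (p.2 = 3)), l.any (fun p => decide (p.2 = 2))) := by
  have h := PySem.List.foldl_pyRange_zero_pyGetD' l ((0 : Int), (0 : Int))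
      (fun st (p : Int × Int) =>
        if p.2 = 3 then (true, st.2)
        else if p.2 = 2 then (st.1, true) else st) (false, false)
  simp only [] at h ⊢
  rw [h, flagsFold]
  simp

theorem esFull_eq_any (t : List Int) :
    esFull t = ((t.any fun x => decide (t.count x = 3)) &&
                (t.any fun x => decide (t.count x = 2))) := by
  unfold esFull
  dsimp only
  have h1 : (PySem.List.pyRange 0 (t.length : Int) 1).foldl
      (fun acc i => acc ++ [dado_esta_repito (PySem.List.pyGetD t i 0) t]) []
      = t.map (fun x => dado_esta_repito x t) := by
    rw [PySem.List.foldl_pyRange_zero_pyGetD' t 0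
          (fun acc x => acc ++ [dado_esta_repito x t]) []]
    rw [PySem.List.foldl_append_singleton_eq_map]
    simp
  rw [h1, secondFold]
  simp only [List.any_map, Function.comp_def, dado_esta_repito]
  norm_cast

-- scanRuns consumes a block of copies of the current value by incrementing the run
theorem scanRuns_replicate (v : Int) (t : List Int) (k run : Nat) (h3 h2 : Bool) :
    scanRuns (List.replicate k v ++ t) (some v) run h3 h2
      = scanRuns t (some v) (run + k) h3 h2 := by
  induction k generalizing run with
  | zero => simp
  | succ k ih =>
    simp only [List.replicate_succ, List.cons_append, scanRuns]
    rw [if_pos trivial, ih]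
    ring_nf

-- at a run boundary (next value differs), carrying the old run equals flushing and restarting
theorem scanRuns_flush (v : Int) (t : List Int) (run : Nat) (h3 h2 : Bool)
    (ht : t = [] ∨ ∃ w r, t = w :: r ∧ w ≠ v) :
    scanRuns t (some v) run h3 h2
      = scanRuns t none 0 (flushRun run h3 h2).1 (flushRun run h3 h2).2 := by
  rcases ht with h | ⟨w, r, rfl, hw⟩
  · subst h; simp [scanRuns, flushRun]
  · simp only [scanRuns]
    rw [if_neg (by simp [hw.symm]), if_neg (by simp)]
    simp [flushRun]

-- any is determined by the values of the predicate on the members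
theorem any_congr_mem {a : Type} (l : List a) (p q : a → Bool) (h : ∀ x ∈ l, p x = q x) :
    l.any p = l.any q := by
  induction l with
  | nil => rfl
  | cons y r ih =>
    simp only [List.any_cons, h y (by simp)]
    rw [ih (fun x hx => h x (by simp [hx]))]

-- the main run-scan characterisation on a sorted list
theorem scanRuns_sorted (n : Nat) : ∀ (s : List Int), s.length ≤ n → s.Pairwise (· ≤ ·) →
    ∀ (h3 h2 : Bool),
    scanRuns s none 0 h3 h2
      = (h3 || s.any (fun x => decide (s.count x = 3)),
         h2 || s.any (fun x => decide (s.count x = 2))) := by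
  induction n with
  | zero =>
    intro s hl _ h3 h2
    have : s = [] := List.length_eq_zero_iff.mp (Nat.le_zero.mp hl)
    subst this
    simp [scanRuns, flushRun]
  | succ n ih =>
    intro s hl hs h3 h2
    match s, hs with
    | [], _ => simp [scanRuns, flushRun]
    | v :: r, hs =>
      rw [List.pairwise_cons] at hs
      obtain ⟨hvr, hr⟩ := hs
      -- split r into the leading run of v's and the rest t
      obtain ⟨t, ht⟩ : ∃ t', t' = r.dropWhile (fun x => x == v) := ⟨_, rfl⟩
      obtain ⟨m, hm⟩ : ∃ m', m' = (r.takeWhile (fun x => x == v)).length := ⟨_, rfl⟩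
      have hsplit : r = List.replicate m v ++ t := by
        conv_lhs => rw [← List.takeWhile_append_dropWhile (p := fun x => x == v) (l := r)]
        rw [ht, hm]
        congr 1
        exact List.eq_replicate_of_mem (fun b hb => by
          have := List.mem_takeWhile_imp hb
          simpa using this)
      -- the rest t is sorted and starts (if nonempty) with a value ≠ v
      have htsort : t.Pairwise (· ≤ ·) := by
        rw [ht]; exact List.Pairwise.sublist (List.dropWhile_sublist _) hr
      have htshape : t = [] ∨ ∃ w r', t = w :: r' ∧ w ≠ v := by
        cases htt : t with
        | nil => exact Or.inl rfl
        | cons w r' =>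
          refine Or.inr ⟨w, r', rfl, ?_⟩
          have hne : r.dropWhile (fun x => x == v) ≠ [] := by
            rw [← ht, htt]; simp
          have := List.head_dropWhile_not (fun x => x == v) hne
          have hhead : (r.dropWhile (fun x => x == v)).head hne = w := by
            simp [← ht, htt]
          rw [hhead] at this
          simpa using this
      -- v does not occur in t
      have hvt : v ∉ t := by
        rcases htshape with h0 | ⟨w, r', hteq, hwv⟩
        · simp [h0]
        · intro hmem
          rw [hteq] at hmem htsort
          rcases List.mem_cons.mp hmem with h | h
          · exact hwv h.symm
          · have hwx : w ≤ v := (List.pairwise_cons.mp htsort).1 v h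
            have hvw : v ≤ w := hvr w (by rw [hsplit, hteq]; simp)
            exact hwv (le_antisymm hwx hvw)
      have hcountvt : t.count v = 0 := List.count_eq_zero.mpr hvt
      clear ht hm
      subst hsplit
      -- counts in s
      have hcountv : (v :: (List.replicate m v ++ t)).count v = 1 + m := by
        simp [List.count_append, hcountvt, Nat.add_comm]
      have hcountx : ∀ x, x ≠ v →
          (v :: (List.replicate m v ++ t)).count x = t.count x := by
        intro x hx
        simp [List.count_append, List.count_replicate, Ne.symm hx]
      -- run the scan: open the first run, consume it, flush at the boundary
      have step1 : scanRuns (v :: (List.replicate m v ++ t)) none 0 h3 h2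
          = scanRuns (List.replicate m v ++ t) (some v) 1 h3 h2 := by
        simp [scanRuns, flushRun]
      have step2 : scanRuns (List.replicate m v ++ t) (some v) 1 h3 h2
          = scanRuns t (some v) (1 + m) h3 h2 :=
        scanRuns_replicate v t m 1 h3 h2
      have step3 : scanRuns t (some v) (1 + m) h3 h2
          = scanRuns t none 0 (flushRun (1 + m) h3 h2).1 (flushRun (1 + m) h3 h2).2 :=
        scanRuns_flush v t (1 + m) h3 h2 htshape
      have hlt : t.length ≤ n := by
        have := hl
        simp [List.length_append] at this
        omega
      have step4 := ih t hlt htsort (flushRun (1 + m) h3 h2).1 (flushRun (1 + m) h3 h2).2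
      -- assemble: any over s = the head run's test || any over t (with counts taken in t)
      have hany : ∀ c : Nat,
          (v :: (List.replicate m v ++ t)).any
              (fun x => decide ((v :: (List.replicate m v ++ t)).count x = c))
            = (decide (1 + m = c) || t.any (fun x => decide (t.count x = c))) := by
        intro c
        rw [List.any_cons, List.any_append]
        simp only [hcountv]
        rw [any_congr_mem t _ (fun x => decide (t.count x = c))
          (fun x hx => by rw [hcountx x (fun h => hvt (h ▸ hx))])]
        have hrep : (List.replicate m v).any
            (fun x => decide ((v :: (List.replicate m v ++ t)).count x = c))
            = (decide (m ≠ 0) && decide (1 + m = c)) := by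
          cases m with
          | zero => simp
          | succ k =>
            rw [any_congr_mem _ _ (fun _ => decide ((v :: (List.replicate (k+1) v ++ t)).count v = c))
              (fun x hx => by rw [List.eq_of_mem_replicate hx])]
            simp only [hcountv]
            simp [List.any_replicate]
        rw [hrep]
        cases hd : decide (1 + m = c) <;> simp
      rw [step1, step2, step3, step4, flushRun_eq]
      rw [hany 3, hany 2]
      simp [Bool.or_assoc]

theorem esFull_alt_eq_any (t : List Int) :
    esFull_alt t = ((t.any fun x => decide (t.count x = 3)) &&
                    (t.any fun x => decide (t.count x = 2))) := by
  unfold esFull_alt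
  dsimp only
  set s := PySem.List.sorted t (fun x => x) false with hsdef
  have hsort : s.Pairwise (· ≤ ·) := by
    have := PySem.List.sorted_pairwise t (fun x => x)
    simpa using this
  have hperm : s.Perm t := PySem.List.sorted_perm t (fun x => x) false
  rw [scanRuns_sorted s.length s le_rfl hsort false false]
  have hany : ∀ c : Nat, s.any (fun x => decide (s.count x = c))
      = t.any (fun x => decide (t.count x = c)) := by
    intro c
    rw [any_congr_mem s _ (fun x => decide (t.count x = c))
      (fun x _ => by rw [hperm.count_eq])]
    exact hperm.any_eq
  simp [hany 3, hany 2]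

-- ===== VERDICT (by name: the statement is the Claim_ definition above) =====
theorem esFull_spec : Claim_equal_esFull := by
  intro t _
  unfold Spec_esFull
  rw [esFull_eq_any, esFull_alt_eq_any]
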